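-- pv_equiv track=rewrite | github.com/bscoj/coding-assistant | agent_server/filesystem_tools.py | _classify_ci_systems
-- ===== SOURCE A (Python) =====
-- def _classify_ci_systems(paths: list[str]) -> list[str]:
--     systems: list[str] = []
--     lowered = [path.lower() for path in paths]
--
--     def add(name: str, predicate: bool) -> None:
--         if predicate and name not in systems:
--             systems.append(name)
--
--     add("github_actions", any(path.startswith(".github/workflows/") for path in lowered))
--     add("gitlab_ci", any(path == ".gitlab-ci.yml" or path.startswith(".gitlab/") for path in lowered))
--     add("circleci", any(path.startswith(".circleci/") for path in lowered))
--     add("jenkins", any(path.endswith("jenkinsfile") for path in lowered))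
--     add("azure_pipelines", any("azure-pipelines" in path for path in lowered))
--     add("buildkite", any(path.startswith(".buildkite/") for path in lowered))
--     add("bitbucket_pipelines", any(path == "bitbucket-pipelines.yml" for path in lowered))
--     return systems
-- ===== SOURCE B (Python) =====
-- _CI_ORDER = [
--     "github_actions",
--     "gitlab_ci",
--     "circleci",
--     "jenkins",
--     "azure_pipelines",
--     "buildkite",
--     "bitbucket_pipelines",
-- ]
--
--
-- def _classify_ci_systems(paths: list[str]) -> list[str]:
--     found: set[str] = set()
--     for path in paths:
--         p = path.lower()
--         if p.startswith(".github/workflows/"):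
--             found.add("github_actions")
--         if p == ".gitlab-ci.yml" or p.startswith(".gitlab/"):
--             found.add("gitlab_ci")
--         if p.startswith(".circleci/"):
--             found.add("circleci")
--         if p.endswith("jenkinsfile"):
--             found.add("jenkins")
--         if "azure-pipelines" in p:
--             found.add("azure_pipelines")
--         if p.startswith(".buildkite/"):
--             found.add("buildkite")
--         if p == "bitbucket-pipelines.yml":
--             found.add("bitbucket_pipelines")
--     return [name for name in _CI_ORDER if name in found]
-- ===== Notes on version B (the rewrite author's own statement) =====
-- stated objective: alternative
-- what changed: B makes one pass over the paths collecting matching system names in a set, then emits them by filtering a fixed canonical order list, instead of A's seven separate any() scans over the lowered list with conditional appends.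
import Mathlib
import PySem

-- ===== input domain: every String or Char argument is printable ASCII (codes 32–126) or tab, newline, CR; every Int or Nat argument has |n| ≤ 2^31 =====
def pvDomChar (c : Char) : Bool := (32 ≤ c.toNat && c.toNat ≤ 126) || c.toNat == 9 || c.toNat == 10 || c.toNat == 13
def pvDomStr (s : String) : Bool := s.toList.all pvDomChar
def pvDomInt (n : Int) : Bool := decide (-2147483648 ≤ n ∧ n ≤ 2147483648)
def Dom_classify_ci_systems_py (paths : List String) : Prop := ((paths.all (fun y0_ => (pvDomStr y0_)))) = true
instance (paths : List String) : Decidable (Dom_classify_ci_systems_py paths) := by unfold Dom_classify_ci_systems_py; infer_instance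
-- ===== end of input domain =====

-- B replaces A's seven any() scans + conditional appends by a single pass collecting
-- matches into a set and a final filter of a fixed canonical order list (objective: alternative).

-- ===== PORT A =====
-- A's inner 'add' helper: append name if predicate holds and name not already present
def pyAddCI (systems : List String) (name : String) (pred : Bool) : List String :=
  if pred && !(systems.contains name) then systems ++ [name] else systems

def classify_ci_systems_py (paths : List String) : List String :=
  let lowered := paths.map PySem.Str.lower
  let systems : List String := []
  let systems := pyAddCI systems "github_actions"
    (lowered.any (fun p => PySem.Str.startswith p ".github/workflows/"))
  let systems := pyAddCI systems "gitlab_ci"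
    (lowered.any (fun p => p == ".gitlab-ci.yml" || PySem.Str.startswith p ".gitlab/"))
  let systems := pyAddCI systems "circleci"
    (lowered.any (fun p => PySem.Str.startswith p ".circleci/"))
  let systems := pyAddCI systems "jenkins"
    (lowered.any (fun p => PySem.Str.endswith p "jenkinsfile"))
  let systems := pyAddCI systems "azure_pipelines"
    (lowered.any (fun p => PySem.Str.isIn "azure-pipelines" p))
  let systems := pyAddCI systems "buildkite"
    (lowered.any (fun p => PySem.Str.startswith p ".buildkite/"))
  let systems := pyAddCI systems "bitbucket_pipelines"
    (lowered.any (fun p => p == "bitbucket-pipelines.yml"))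
  systems

-- ===== PORT B =====
def ciOrder : List String :=
  ["github_actions", "gitlab_ci", "circleci", "jenkins",
   "azure_pipelines", "buildkite", "bitbucket_pipelines"]

-- one loop body of B: test all seven conditions on one (lowercased) path
def ciDetect (found : PySem.Set String) (path : String) : PySem.Set String :=
  let p := PySem.Str.lower path
  let found := if PySem.Str.startswith p ".github/workflows/" then PySem.Set.add found "github_actions" else found
  let found := if p == ".gitlab-ci.yml" || PySem.Str.startswith p ".gitlab/" then PySem.Set.add found "gitlab_ci" else found
  let found := if PySem.Str.startswith p ".circleci/" then PySem.Set.add found "circleci" else found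
  let found := if PySem.Str.endswith p "jenkinsfile" then PySem.Set.add found "jenkins" else found
  let found := if PySem.Str.isIn "azure-pipelines" p then PySem.Set.add found "azure_pipelines" else found
  let found := if PySem.Str.startswith p ".buildkite/" then PySem.Set.add found "buildkite" else found
  let found := if p == "bitbucket-pipelines.yml" then PySem.Set.add found "bitbucket_pipelines" else found
  found

def classify_ci_systems_py_alt (paths : List String) : List String :=
  let found := paths.foldl ciDetect PySem.Set.empty
  ciOrder.filter (fun name => PySem.Set.contains found name)

-- ===== PRECONDITION & SPEC =====
def Spec_classify_ci_systems_py (paths : List String) (out : List String) : Prop := out = classify_ci_systems_py_alt paths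
instance (paths : List String) (out : List String) : Decidable (Spec_classify_ci_systems_py paths out) := by unfold Spec_classify_ci_systems_py; infer_instance

-- ===== CLAIM (what is proved, stated in full; the proofs are below) =====
def Claim_equal_classify_ci_systems_py : Prop := ∀ (paths : List String), Dom_classify_ci_systems_py paths → Spec_classify_ci_systems_py paths (classify_ci_systems_py paths)

-- ===== LEMMAS AND PROOFS =====

-- the seven tests as one function of the detected name and the lowered path
def ciCond (name : String) (p : String) : Bool :=
  if name = "github_actions" then PySem.Str.startswith p ".github/workflows/"
  else if name = "gitlab_ci" then p == ".gitlab-ci.yml" || PySem.Str.startswith p ".gitlab/"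
  else if name = "circleci" then PySem.Str.startswith p ".circleci/"
  else if name = "jenkins" then PySem.Str.endswith p "jenkinsfile"
  else if name = "azure_pipelines" then PySem.Str.isIn "azure-pipelines" p
  else if name = "buildkite" then PySem.Str.startswith p ".buildkite/"
  else if name = "bitbucket_pipelines" then p == "bitbucket-pipelines.yml"
  else false

theorem contains_condAdd (c : Bool) (s : PySem.Set String) (x y : String) :
    PySem.Set.contains (if c then PySem.Set.add s x else s) y
      = (PySem.Set.contains s y || (c && decide (y = x))) := by
  cases c
  · simp
  · show PySem.Set.contains (PySem.Set.add s x) y = _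
    simp only [PySem.Set.add, Bool.true_and]
    split_ifs with h
    · by_cases hy : y = x
      · subst hy; simp only [PySem.Set.contains] at *; simp_all
      · simp [PySem.Set.contains, hy]
    · simp [PySem.Set.contains]

theorem contains_ciDetect (s : PySem.Set String) (p name : String) (h : name ∈ ciOrder) :
    PySem.Set.contains (ciDetect s p) name
      = (PySem.Set.contains s name || ciCond name (PySem.Str.lower p)) := by
  simp only [ciOrder, List.mem_cons, List.not_mem_nil, or_false] at h
  rcases h with rfl | rfl | rfl | rfl | rfl | rfl | rfl <;>
    simp only [ciDetect, contains_condAdd] <;>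
    simp [ciCond]

theorem contains_foldl_ciDetect (paths : List String) (s : PySem.Set String) (name : String)
    (h : name ∈ ciOrder) :
    PySem.Set.contains (paths.foldl ciDetect s) name
      = (PySem.Set.contains s name || paths.any (fun p => ciCond name (PySem.Str.lower p))) := by
  induction paths generalizing s with
  | nil => simp
  | cons p rest ih =>
      simp only [List.foldl_cons, List.any_cons, ih _ , contains_ciDetect _ _ _ h]
      cases PySem.Set.contains s name <;> simp

-- ciCond at each literal name computes to the corresponding test
theorem ciCond_gha (p : String) : ciCond "github_actions" p = PySem.Str.startswith p ".github/workflows/" := rfl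
theorem ciCond_gl (p : String) : ciCond "gitlab_ci" p = (p == ".gitlab-ci.yml" || PySem.Str.startswith p ".gitlab/") := rfl
theorem ciCond_cc (p : String) : ciCond "circleci" p = PySem.Str.startswith p ".circleci/" := rfl
theorem ciCond_jk (p : String) : ciCond "jenkins" p = PySem.Str.endswith p "jenkinsfile" := rfl
theorem ciCond_az (p : String) : ciCond "azure_pipelines" p = PySem.Str.isIn "azure-pipelines" p := rfl
theorem ciCond_bk (p : String) : ciCond "buildkite" p = PySem.Str.startswith p ".buildkite/" := rfl
theorem ciCond_bb (p : String) : ciCond "bitbucket_pipelines" p = (p == "bitbucket-pipelines.yml") := rfl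

-- ===== VERDICT (by name: the statement is the Claim_ definition above) =====
theorem classify_ci_systems_py_spec : Claim_equal_classify_ci_systems_py := by
  intro paths _
  show _ = _
  simp only [classify_ci_systems_py, classify_ci_systems_py_alt, ciOrder, List.filter,
    contains_foldl_ciDetect _ _ _ (by decide : "github_actions" ∈ ciOrder),
    contains_foldl_ciDetect _ _ _ (by decide : "gitlab_ci" ∈ ciOrder),
    contains_foldl_ciDetect _ _ _ (by decide : "circleci" ∈ ciOrder),
    contains_foldl_ciDetect _ _ _ (by decide : "jenkins" ∈ ciOrder),
    contains_foldl_ciDetect _ _ _ (by decide : "azure_pipelines" ∈ ciOrder),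
    contains_foldl_ciDetect _ _ _ (by decide : "buildkite" ∈ ciOrder),
    contains_foldl_ciDetect _ _ _ (by decide : "bitbucket_pipelines" ∈ ciOrder),
    List.any_map, Function.comp_def,
    ciCond_gha, ciCond_gl, ciCond_cc, ciCond_jk, ciCond_az, ciCond_bk, ciCond_bb]
  simp only [PySem.Set.contains, PySem.Set.empty, List.contains_nil, Bool.false_or]
  generalize (paths.any fun p => PySem.Str.startswith (PySem.Str.lower p) ".github/workflows/") = b1
  generalize (paths.any fun p => PySem.Str.lower p == ".gitlab-ci.yml" || PySem.Str.startswith (PySem.Str.lower p) ".gitlab/") = b2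
  generalize (paths.any fun p => PySem.Str.startswith (PySem.Str.lower p) ".circleci/") = b3
  generalize (paths.any fun p => PySem.Str.endswith (PySem.Str.lower p) "jenkinsfile") = b4
  generalize (paths.any fun p => PySem.Str.isIn "azure-pipelines" (PySem.Str.lower p)) = b5
  generalize (paths.any fun p => PySem.Str.startswith (PySem.Str.lower p) ".buildkite/") = b6
  generalize (paths.any fun p => PySem.Str.lower p == "bitbucket-pipelines.yml") = b7
  cases b1 <;> cases b2 <;> cases b3 <;> cases b4 <;> cases b5 <;> cases b6 <;> cases b7 <;> rfl
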